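-- pv_equiv track=rewrite | github.com/DPNT-Sourcecode/CHK-jahe01 | lib/solutions/CHK/checkout_solution.py | price_A
-- ===== SOURCE A (Python) =====
-- UNIT_PRICE = {
--     "A": 50, "B": 30, "C": 20, "D": 15, "E": 40,
--     "F": 10, "G": 20, "H": 10, "I": 35, "J": 60,
--     "K": 70, "L": 90, "M": 15, "N": 40, "O": 10,
--     "P": 50, "Q": 30, "R": 50, "S": 20, "T": 20,
--     "U": 40, "V": 50, "W": 20, "X": 17, "Y": 20,
--     "Z": 21,
-- }
--
-- BUNDLE_DEALS = {
--     "A": {"PRICE_FOR_5": 200, "PRICE_FOR_3": 130},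
--     "B": {"PRICE_FOR_2": 45},
--     "H": {"PRICE_FOR_10": 80, "PRICE_FOR_5": 45},
--     "K": {"PRICE_FOR_2": 120},
--     "P": {"PRICE_FOR_5": 200},
--     "Q": {"PRICE_FOR_3": 80},
--     "V": {"PRICE_FOR_3": 130, "PRICE_FOR_2": 90},
--     "F": {"PRICE_FOR_3": 2 * UNIT_PRICE["F"]},
--     "U": {"PRICE_FOR_4": 3 * UNIT_PRICE["U"]},
-- }
--
-- def price_A(amount):
--     unit_price = UNIT_PRICE['A']
--     lowest_total_price = amount * unit_price  # baseline with no discounts applied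
--
--     # Explore all possible mixes of 5-pack and 3-pack bundles
--     for num_five_pack_bundles in range(amount // 5 + 1):
--         remaining_after_fives = amount - 5 * num_five_pack_bundles
--
--         for num_three_pack_bundles in range(remaining_after_fives // 3 + 1):
--             remaining_singles = remaining_after_fives - 3 * num_three_pack_bundles
--
--             total_for_this_combo = (
--                 num_five_pack_bundles * BUNDLE_DEALS["A"]["PRICE_FOR_5"]
--                 + num_three_pack_bundles * BUNDLE_DEALS["A"]["PRICE_FOR_3"]
--                 + remaining_singles * unit_price
--             )
--
--             lowest_total_price = min(lowest_total_price, total_for_this_combo)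
--
--     return lowest_total_price
-- ===== SOURCE B (Python) =====
-- def price_A(amount):
--     # Greedy closed form: the five-pack has the best per-unit price and the
--     # three-pack the second best, so take as many five-packs as possible,
--     # then three-packs on the remainder, then singles.
--     fives, rem = divmod(amount, 5)
--     threes, singles = divmod(rem, 3)
--     return fives * 200 + threes * 130 + singles * 50
-- ===== Notes on version B (the rewrite author's own statement) =====
-- stated objective: faster
-- what changed: Replaces the quadratic exhaustive search over all five-pack/three-pack mixes by a constant-time greedy closed form (largest packs first, via divmod), proved optimal since the five-pack has the best per-unit price and the three-pack the second best.
-- outside the precondition, e.g. on price_A(-1): A returns -50, B returns -20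
import Mathlib
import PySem

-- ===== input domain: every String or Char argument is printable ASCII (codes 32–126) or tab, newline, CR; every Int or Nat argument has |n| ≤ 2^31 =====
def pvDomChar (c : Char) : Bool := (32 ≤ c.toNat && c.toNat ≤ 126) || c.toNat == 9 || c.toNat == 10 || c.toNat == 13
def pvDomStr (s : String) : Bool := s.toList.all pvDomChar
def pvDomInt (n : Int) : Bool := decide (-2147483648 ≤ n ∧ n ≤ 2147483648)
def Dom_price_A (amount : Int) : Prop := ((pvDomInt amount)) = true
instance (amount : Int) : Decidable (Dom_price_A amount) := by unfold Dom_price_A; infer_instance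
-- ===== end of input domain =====

-- B replaces A's quadratic exhaustive search over all five-pack/three-pack mixes by a
-- constant-time greedy closed form (max five-packs, then three-packs on the remainder).

-- ===== PORT A =====
def price_A (amount : Int) : Int :=
  let unit_price : Int := 50
  let lowest_total_price := amount * unit_price
  (PySem.List.pyRange 0 (PySem.Int.floordiv amount 5 + 1) 1).foldl
    (fun low f =>
      (PySem.List.pyRange 0 (PySem.Int.floordiv (amount - 5 * f) 3 + 1) 1).foldl
        (fun low2 t =>
          min low2 (f * 200 + t * 130 + ((amount - 5 * f) - 3 * t) * unit_price)) low)
    lowest_total_price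

-- ===== PORT B =====
def price_A_alt (amount : Int) : Int :=
  let fives := PySem.Int.floordiv amount 5
  let rem := PySem.Int.mod amount 5
  let threes := PySem.Int.floordiv rem 3
  let singles := PySem.Int.mod rem 3
  fives * 200 + threes * 130 + singles * 50

-- ===== PRECONDITION & SPEC =====
-- Pre_ restricts to the function's natural domain: a nonnegative item count. For
-- negative amounts A's loops are empty and it returns the accidental baseline
-- amount*50 (a negative price), which B's greedy arithmetic does not reproduce.
def Pre_price_A (amount : Int) : Prop := 0 ≤ amount
instance (amount : Int) : Decidable (Pre_price_A amount) := by unfold Pre_price_A; infer_instance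
def pvWitness_price_A : Int := 7

def Spec_price_A (amount : Int) (out : Int) : Prop := out = price_A_alt amount
instance (amount : Int) (out : Int) : Decidable (Spec_price_A amount out) := by unfold Spec_price_A; infer_instance

-- ===== CLAIM (what is proved, stated in full; the proofs are below) =====
def Claim_equal_price_A : Prop := ∀ (amount : Int), Dom_price_A amount → Pre_price_A amount → Spec_price_A amount (price_A amount)

-- ===== LEMMAS AND PROOFS =====

-- fold of (min with v) never exceeds its initial accumulator
theorem pv_foldl_min_le_init (v : Int → Int) (l : List Int) (i : Int) :
    l.foldl (fun a x => min a (v x)) i ≤ i := by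
  induction l generalizing i with
  | nil => simp
  | cons x l ih => exact le_trans (ih (min i (v x))) (min_le_left _ _)

-- fold of (min with v) is bounded by every visited value
theorem pv_foldl_min_le_mem (v : Int → Int) (l : List Int) (i x : Int) (hx : x ∈ l) :
    l.foldl (fun a x => min a (v x)) i ≤ v x := by
  induction l generalizing i with
  | nil => cases hx
  | cons y l ih =>
    rcases List.mem_cons.mp hx with h | h
    · subst h
      exact le_trans (pv_foldl_min_le_init v l (min i (v x))) (min_le_right _ _)
    · exact ih (min i (v y)) h

-- a common lower bound of the init and all visited values bounds the fold
theorem pv_le_foldl_min (v : Int → Int) (l : List Int) (i c : Int)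
    (hi : c ≤ i) (h : ∀ x ∈ l, c ≤ v x) :
    c ≤ l.foldl (fun a x => min a (v x)) i := by
  induction l generalizing i with
  | nil => simpa
  | cons x l ih =>
    exact ih (min i (v x)) (le_min hi (h x List.mem_cons_self)) (fun y hy => h y (List.mem_cons_of_mem _ hy))

-- taking one more five-pack never hurts: the best value reachable with f five-packs
-- is monotone in f (proved by stepping f up one pack at a time)
theorem pv_M_mono (n : Int) : ∀ (k : Nat) (f : Int), 0 ≤ f → f + k ≤ n / 5 →
    f * 50 + (n - 5 * f) / 3 * 20 ≤ (f + k) * 50 + (n - 5 * (f + k)) / 3 * 20 := by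
  intro k
  induction k with
  | zero => intro f _ _; norm_num
  | succ k ih =>
    intro f hf hfk
    have h2 := ih (f + 1) (by omega) (by push_cast at hfk ⊢; omega)
    have h1 : f * 50 + (n - 5 * f) / 3 * 20 ≤ (f + 1) * 50 + (n - 5 * (f + 1)) / 3 * 20 := by
      omega
    calc f * 50 + (n - 5 * f) / 3 * 20 ≤ (f + 1) * 50 + (n - 5 * (f + 1)) / 3 * 20 := h1
      _ ≤ (f + 1 + k) * 50 + (n - 5 * (f + 1 + k)) / 3 * 20 := h2
      _ = (f + (k + 1 : Nat)) * 50 + (n - 5 * (f + (k + 1 : Nat))) / 3 * 20 := by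
          push_cast; ring_nf

theorem pv_M_le (n f : Int) (hf : 0 ≤ f) (hfq : f ≤ n / 5) :
    f * 50 + (n - 5 * f) / 3 * 20 ≤ n / 5 * 50 + n % 5 / 3 * 20 := by
  have h := pv_M_mono n (n / 5 - f).toNat f hf (by omega)
  omega

-- the nested fold never exceeds its initial accumulator
theorem pv_outer_le_init (g : Int → Int → Int) (T : Int → List Int) (L : List Int) (i : Int) :
    L.foldl (fun a f => (T f).foldl (fun a2 t => min a2 (g f t)) a) i ≤ i := by
  induction L generalizing i with
  | nil => simp
  | cons f L ih =>
    exact le_trans (ih _) (pv_foldl_min_le_init (g f) (T f) i)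

-- the nested fold is bounded by every visited combo value
theorem pv_outer_le_combo (g : Int → Int → Int) (T : Int → List Int) (L : List Int) (i f t : Int)
    (hf : f ∈ L) (ht : t ∈ T f) :
    L.foldl (fun a f => (T f).foldl (fun a2 t => min a2 (g f t)) a) i ≤ g f t := by
  induction L generalizing i with
  | nil => cases hf
  | cons f' L ih =>
    rcases List.mem_cons.mp hf with h | h
    · subst h
      exact le_trans (pv_outer_le_init g T L _) (pv_foldl_min_le_mem (g f) (T f) i t ht)
    · exact ih _ h

-- a common lower bound of the init and all visited combos bounds the nested fold
theorem pv_le_outer (g : Int → Int → Int) (T : Int → List Int) (L : List Int) (i c : Int)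
    (hi : c ≤ i) (h : ∀ f ∈ L, ∀ t ∈ T f, c ≤ g f t) :
    c ≤ L.foldl (fun a f => (T f).foldl (fun a2 t => min a2 (g f t)) a) i := by
  induction L generalizing i with
  | nil => simpa
  | cons f L ih =>
    exact ih _ (pv_le_foldl_min (g f) (T f) i c hi (h f List.mem_cons_self))
      (fun f' hf' => h f' (List.mem_cons_of_mem _ hf'))

-- ===== VERDICT (by name: the statement is the Claim_ definition above) =====
theorem price_A_spec : Claim_equal_price_A := by
  intro n _ hn
  replace hn : 0 ≤ n := hn
  unfold Spec_price_A price_A price_A_alt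
  simp only []
  rw [PySem.Int.floordiv_eq_ediv_of_pos (a := n) (by norm_num),
      PySem.Int.mod_eq_emod_of_pos (a := n) (by norm_num),
      PySem.Int.floordiv_eq_ediv_of_pos (a := n % 5) (by norm_num),
      PySem.Int.mod_eq_emod_of_pos (a := n % 5) (by norm_num)]
  set G : Int := n / 5 * 200 + n % 5 / 3 * 130 + n % 5 % 3 * 50 with hG
  have hfd : ∀ m : Int, PySem.Int.floordiv m 3 = m / 3 := fun m =>
    PySem.Int.floordiv_eq_ediv_of_pos (by norm_num)
  simp only [hfd]
  apply le_antisymm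
  · -- the fold reaches the greedy combo
    have hfmem : (n / 5) ∈ PySem.List.pyRange 0 (n / 5 + 1) 1 := by
      rw [PySem.List.mem_pyRange_one]; omega
    have htmem : (n % 5 / 3) ∈
        PySem.List.pyRange 0 ((n - 5 * (n / 5)) / 3 + 1) 1 := by
      rw [PySem.List.mem_pyRange_one]
      constructor <;> omega
    have := pv_outer_le_combo
      (fun f t => f * 200 + t * 130 + ((n - 5 * f) - 3 * t) * 50)
      (fun f => PySem.List.pyRange 0 ((n - 5 * f) / 3 + 1) 1)
      (PySem.List.pyRange 0 (n / 5 + 1) 1) (n * 50) (n / 5) (n % 5 / 3) hfmem htmem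
    refine le_trans this ?_
    beta_reduce
    rw [hG]; omega
  · -- the greedy value bounds the init and every visited combo
    apply pv_le_outer
    · rw [hG]; omega
    · intro f hf t ht
      rw [PySem.List.mem_pyRange_one] at hf ht
      have hM := pv_M_le n f hf.1 (by omega)
      rw [hG]; omega
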